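-- pv_equiv track=rewrite | github.com/joestauss/py_util | Command Line Tools/old.cli_utility.py | boxed_text
-- ===== SOURCE A (Python) =====
-- def boxed_text( *args, BUFFER_SPACE=5 ):
--     """boxed_text   is a function that pretty-prints its args in a box.
--
--     Parameters
--     -----------
--         args
--             Each arg in args will be interpretted as a string, unless it's a non-string iterable, in which case it will be unpacked.
--
--         BUFFER_SPACE: int
--             The number of spaces between the longest text line and the left/ right borders.
--     """ #v1
--     def unpack_strings( obj):
--         if isinstance( obj, str) or not hasattr(obj, '__iter__'):
--             return [ str (obj)]
--         else:
--             lines = []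
--             for item in obj:
--                 lines = lines + unpack_strings( item)
--             return lines
--
--     lines = unpack_strings( args)
--
--     MAX_LEN         = max( map( lambda s: len(s), lines))
--     GAP             = '||' + ' '*(MAX_LEN + 2*BUFFER_SPACE) +'||'
--     HORIZONTAL_LINE = '='* (MAX_LEN + 2*BUFFER_SPACE + 4)
--     RIGHT_BORDER    = '||' + ' '*BUFFER_SPACE
--     LEFT_BORDER     =  ' '*BUFFER_SPACE + '||'
--     TOP_BORDER      = (HORIZONTAL_LINE, GAP)
--     BOTTOM_BORDER   = (GAP, HORIZONTAL_LINE)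
--     return "\n".join([*TOP_BORDER, *map( lambda l: RIGHT_BORDER + l + ' '*(MAX_LEN - len(l))+ LEFT_BORDER, lines), *BOTTOM_BORDER])
-- ===== SOURCE B (Python) =====
-- def boxed_text(*args, BUFFER_SPACE=5):
--     """Pretty-print args in an ASCII box (iterative flattener instead of recursion)."""
--     stack = list(args)[::-1]
--     lines = []
--     while stack:
--         item = stack.pop()
--         if isinstance(item, str) or not hasattr(item, '__iter__'):
--             lines.append(str(item))
--         else:
--             stack.extend(list(item)[::-1])
--     width = 0
--     for l in lines:
--         if len(l) > width:
--             width = len(l)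
--     inner = width + 2 * BUFFER_SPACE
--     pad = ' ' * BUFFER_SPACE
--     horiz = '=' * (inner + 4)
--     gap = '||' + ' ' * inner + '||'
--     body = ['||' + pad + l + ' ' * (width - len(l)) + pad + '||' for l in lines]
--     return '\n'.join([horiz, gap, *body, gap, horiz])
-- ===== Notes on version B (the rewrite author's own statement) =====
-- stated objective: faster
-- what changed: Replaces the recursive unpack_strings helper (which rebuilds the lines list with quadratic 'lines = lines + ...' concatenation) with an explicit stack-based iterative flattener that appends in place, and the max(map(len,...)) call with a running-maximum loop; box rows are built with symmetric pads instead of precomputed RIGHT/LEFT border strings.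
import Mathlib
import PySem

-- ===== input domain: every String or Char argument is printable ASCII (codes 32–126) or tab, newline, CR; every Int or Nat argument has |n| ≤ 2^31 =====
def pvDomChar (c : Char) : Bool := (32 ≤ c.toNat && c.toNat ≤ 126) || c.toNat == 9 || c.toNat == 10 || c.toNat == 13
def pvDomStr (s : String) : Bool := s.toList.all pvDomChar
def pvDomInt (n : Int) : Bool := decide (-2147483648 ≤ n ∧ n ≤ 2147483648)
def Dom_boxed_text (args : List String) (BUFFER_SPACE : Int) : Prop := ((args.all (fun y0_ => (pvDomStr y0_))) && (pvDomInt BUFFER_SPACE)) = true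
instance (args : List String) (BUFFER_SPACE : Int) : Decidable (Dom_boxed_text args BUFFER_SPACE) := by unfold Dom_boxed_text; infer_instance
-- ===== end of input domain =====

-- B replaces the recursive unpack_strings helper with an explicit stack-based iterative
-- flattener and the max() call with a running-maximum loop (objective: alternative).
-- CALLING CONVENTION (both ports): boxed_text(args, BUFFER_SPACE) binds BOTH parameters
-- positionally, so Python's *args receives the tuple (args, BUFFER_SPACE) — the int is
-- stringified as one more line — and the keyword-only BUFFER_SPACE keeps its default 5.

-- ' ' * n / '=' * n with a Python int count (negative → empty string)
def pyRepChar (c : Char) (n : Int) : String := String.ofList (List.replicate n.toNat c)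

-- an item on which unpack_strings recurses / which Source B's stack holds
inductive PyItem where
  | strList : List String → PyItem   -- the first positional argument: a list of str (iterable, not a str)
  | intLit  : Int → PyItem           -- the second positional argument: an int (no __iter__)
  | strLit  : String → PyItem        -- a str (leaf)
deriving DecidableEq, Repr

-- weight used only for the termination measure of bFlatten below
def pvItemWeight : PyItem → Nat
  | PyItem.strList l => l.length + 2
  | _ => 1

-- ===== PORT A =====
-- unpack_strings: leaf → [str(obj)]; iterable → concatenate the unpackings of its items
def aUnpack : PyItem → List String
  | PyItem.strLit s => [s]
  | PyItem.intLit n => [PySem.Int.toStr n]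
  | PyItem.strList l => l.foldl (fun lines item => lines ++ aUnpack (PyItem.strLit item)) []

def boxed_text (args : List String) (BUFFER_SPACE : Int) : String :=
  -- unpack_strings(args) where the *args tuple is (args, BUFFER_SPACE)
  let lines : List String :=
    [PyItem.strList args, PyItem.intLit BUFFER_SPACE].foldl
      (fun lines item => lines ++ aUnpack item) []
  -- max(map(lambda s: len(s), lines)); lines is never empty (the int is always a line)
  let MAX_LEN : Int :=
    (PySem.List.max? (lines.map (fun s => PySem.Str.len s)) (fun x => x)).getD 0
  -- the keyword-only BUFFER_SPACE parameter keeps its default value 5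
  let GAP := "||" ++ pyRepChar ' ' (MAX_LEN + 2 * 5) ++ "||"
  let HORIZONTAL_LINE := pyRepChar '=' (MAX_LEN + 2 * 5 + 4)
  let RIGHT_BORDER := "||" ++ pyRepChar ' ' 5
  let LEFT_BORDER := pyRepChar ' ' 5 ++ "||"
  PySem.Str.join "\n"
    ([HORIZONTAL_LINE, GAP] ++
      lines.map (fun l =>
        RIGHT_BORDER ++ l ++ pyRepChar ' ' (MAX_LEN - PySem.Str.len l) ++ LEFT_BORDER) ++
      [GAP, HORIZONTAL_LINE])

-- ===== PORT B =====
-- the while-loop of Source B: pop the top of the stack; a leaf is stringified and appended to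
-- lines, an iterable pushes its items. The stack is stored TOP-FIRST here, so Source B's
-- pop-from-the-end with `[::-1]`-reversed pushes is pop-from-the-head with in-order pushes.
def bFlatten (stack : List PyItem) (lines : List String) : List String :=
  match stack with
  | [] => lines
  | PyItem.strLit s :: rest => bFlatten rest (lines ++ [s])
  | PyItem.intLit n :: rest => bFlatten rest (lines ++ [PySem.Int.toStr n])
  | PyItem.strList l :: rest => bFlatten (l.map PyItem.strLit ++ rest) lines
termination_by (stack.map pvItemWeight).sum
decreasing_by all_goals simp [pvItemWeight, Function.comp_def, List.sum_append]

def boxed_text_alt (args : List String) (BUFFER_SPACE : Int) : String :=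
  -- initial stack: list(args)[::-1] of the *args tuple (args, BUFFER_SPACE), top-first
  let lines := bFlatten [PyItem.strList args, PyItem.intLit BUFFER_SPACE] []
  let width : Int :=
    lines.foldl (fun w l => if PySem.Str.len l > w then PySem.Str.len l else w) 0
  let inner : Int := width + 2 * 5   -- BUFFER_SPACE keeps its default 5
  let pad := pyRepChar ' ' 5
  let horiz := pyRepChar '=' (inner + 4)
  let gap := "||" ++ pyRepChar ' ' inner ++ "||"
  let body := lines.map (fun l =>
    "||" ++ pad ++ l ++ pyRepChar ' ' (width - PySem.Str.len l) ++ pad ++ "||")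
  PySem.Str.join "\n" ([horiz, gap] ++ body ++ [gap, horiz])

-- ===== PRECONDITION & SPEC =====
def Spec_boxed_text (args : List String) (BUFFER_SPACE : Int) (out : String) : Prop := out = boxed_text_alt args BUFFER_SPACE
instance (args : List String) (BUFFER_SPACE : Int) (out : String) : Decidable (Spec_boxed_text args BUFFER_SPACE out) := by unfold Spec_boxed_text; infer_instance

-- ===== CLAIM (what is proved, stated in full; the proofs are below) =====
def Claim_equal_boxed_text : Prop := ∀ (args : List String) (BUFFER_SPACE : Int), Dom_boxed_text args BUFFER_SPACE → Spec_boxed_text args BUFFER_SPACE (boxed_text args BUFFER_SPACE)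

-- ===== LEMMAS AND PROOFS =====

theorem foldl_append_singleton (l acc : List String) :
    l.foldl (fun a i => a ++ [i]) acc = acc ++ l := by
  induction l generalizing acc with
  | nil => simp
  | cons x t ih => simp [List.foldl, ih]

theorem aUnpack_strList (l : List String) : aUnpack (PyItem.strList l) = l := by
  simp only [aUnpack]
  exact foldl_append_singleton l []

theorem bFlatten_strLits (l : List String) (rest : List PyItem) (lines : List String) :
    bFlatten (l.map PyItem.strLit ++ rest) lines = bFlatten rest (lines ++ l) := by
  induction l generalizing lines with
  | nil => simp
  | cons x t ih => simp [List.map, bFlatten, ih]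

theorem lines_A (args : List String) (B : Int) :
    [PyItem.strList args, PyItem.intLit B].foldl (fun lines item => lines ++ aUnpack item) []
      = args ++ [PySem.Int.toStr B] := by
  simp [List.foldl, aUnpack_strList, aUnpack]

theorem lines_B (args : List String) (B : Int) :
    bFlatten [PyItem.strList args, PyItem.intLit B] [] = args ++ [PySem.Int.toStr B] := by
  show bFlatten (PyItem.strList args :: [PyItem.intLit B]) [] = _
  rw [bFlatten, bFlatten_strLits]
  simp [bFlatten]

theorem fold_max_int (t : List String) (a : Int) :
    (t.map (fun s => PySem.Str.len s)).foldl max a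
      = t.foldl (fun w l => if PySem.Str.len l > w then PySem.Str.len l else w) a := by
  induction t generalizing a with
  | nil => simp
  | cons x tl ih =>
      simp only [List.map, List.foldl]
      have : max a (PySem.Str.len x)
          = (if PySem.Str.len x > a then PySem.Str.len x else a) := by
        split_ifs with h <;> omega
      rw [this, ih]

theorem len_nonneg (s : String) : 0 ≤ PySem.Str.len s := by
  simp [PySem.Str.len_eq]

-- ===== VERDICT (by name: the statement is the Claim_ definition above) =====
theorem boxed_text_spec : Claim_equal_boxed_text := by
  intro args BUFFER_SPACE _
  unfold Spec_boxed_text boxed_text boxed_text_alt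
  rw [lines_A, lines_B]
  obtain ⟨x, t, hxt⟩ : ∃ x t, args ++ [PySem.Int.toStr BUFFER_SPACE] = x :: t :=
    List.exists_cons_of_ne_nil (by simp)
  rw [hxt]
  simp only [List.map]
  rw [PySem.List.max?_id_cons]
  simp only [Option.getD_some, List.foldl]
  rw [fold_max_int]
  have h0 : (if PySem.Str.len x > 0 then PySem.Str.len x else 0) = PySem.Str.len x := by
    have := len_nonneg x; split_ifs with h <;> omega
  rw [h0]
  simp [String.append_assoc]
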